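-- pv_equiv track=rewrite | github.com/helldeal/IUT2 | Crypt/exo.py | div_eucl_pol
-- ===== SOURCE A (Python) =====
-- import copy
--
-- def div_eucl_pol(A,B):
--     A=copy.deepcopy(A)
--     B=copy.deepcopy(B)
--     binA=0
--     binB=0
--     A.reverse()
--     B.reverse()
--     for i in range(len(A)):
--         if A[i]==1:
--             binA+=(2*A[i])**i
--     for i in range(len(B)):
--         if B[i]==1:
--             binB+=(2*B[i])**i
--     div=[int(i) for i in bin(binA//binB)[2:]]
--     reste=[int(i) for i in bin(binA%binB)[2:]]
--     return div,reste
-- ===== SOURCE B (Python) =====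
-- def div_eucl_pol(A, B):
--     d = 0
--     for bit in B:
--         d = d * 2 + (1 if bit == 1 else 0)
--     # binary long division over A's bit stream: one pass, no big divmod
--     q = []
--     r = 0
--     for bit in A:
--         r = r * 2 + (1 if bit == 1 else 0)
--         q.append(r // d)
--         r %= d
--     k = 0
--     while k + 1 < len(q) and q[k] == 0:
--         k += 1
--     div = q[k:] if q else [0]
--     rb = []
--     while r > 0:
--         rb.append(r % 2)
--         r //= 2
--     rb.reverse()
--     reste = rb if rb else [0]
--     return div, reste
-- ===== Notes on version B (the rewrite author's own statement) =====
-- stated objective: alternative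
-- what changed: Replaces convert-both-lists-then-divmod-then-bin() with schoolbook binary long division: one forward pass over A maintains a running remainder and emits one quotient bit per input bit (r // d with r < 2d), then the remainder's bits are peeled off little-endian (r % 2, r //= 2) and reversed; no deepcopy, no reverse of the inputs, no per-index exponentiation, no bin().
import Mathlib
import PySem

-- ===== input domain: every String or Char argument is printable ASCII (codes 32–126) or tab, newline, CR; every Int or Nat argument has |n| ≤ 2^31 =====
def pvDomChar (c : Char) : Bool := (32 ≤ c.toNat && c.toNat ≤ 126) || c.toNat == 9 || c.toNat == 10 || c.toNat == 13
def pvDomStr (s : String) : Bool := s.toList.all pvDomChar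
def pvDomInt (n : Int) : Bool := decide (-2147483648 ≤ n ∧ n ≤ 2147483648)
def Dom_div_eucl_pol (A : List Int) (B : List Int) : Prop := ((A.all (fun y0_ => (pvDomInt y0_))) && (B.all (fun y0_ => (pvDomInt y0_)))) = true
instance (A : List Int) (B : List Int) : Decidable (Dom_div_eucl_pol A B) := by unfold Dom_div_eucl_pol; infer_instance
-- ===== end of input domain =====

-- B replaces convert/divmod/bin() with one-pass binary long division over A's bits (return value only; A copies its inputs, so neither mutates).

-- hand port of `[int(c) for c in bin(n)[2:]]`: exact for n ≥ 0 (the only values reached here)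
def binDigitsNat : Nat → List Int
  | 0 => []
  | (n+1) => binDigitsNat ((n+1)/2) ++ [(((n+1) % 2 : Nat) : Int)]
decreasing_by omega

def pyBin (n : Int) : List Int := if n ≤ 0 then [0] else binDigitsNat n.toNat

-- ===== PORT A =====
def div_eucl_pol (A : List Int) (B : List Int) : List Int × List Int :=
  let A' := A.reverse
  let B' := B.reverse
  -- for i in range(len(A)): if A[i]==1: binA += (2*A[i])**i   (A[i] at index i ↦ zipIdx pair)
  let binA := A'.zipIdx.foldl (fun s p => if p.1 = 1 then s + (2 * p.1) ^ p.2 else s) 0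
  let binB := B'.zipIdx.foldl (fun s p => if p.1 = 1 then s + (2 * p.1) ^ p.2 else s) 0
  (pyBin (PySem.Int.floordiv binA binB), pyBin (PySem.Int.mod binA binB))

-- ===== PORT B =====
-- `while k+1 < len(q) and q[k]==0: k+=1; q[k:]` = drop leading zeros keeping the last element
def stripZeros : List Int → List Int
  | [] => []
  | [x] => [x]
  | (x :: rest) => if x = 0 then stripZeros rest else x :: rest

-- `while r > 0: rb.append(r % 2); r //= 2` (r is always ≥ 0 here, so Nat is exact)
def remBitsRev : Nat → List Int
  | 0 => []
  | (n+1) => (((n+1) % 2 : Nat) : Int) :: remBitsRev ((n+1)/2)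
decreasing_by omega

def div_eucl_pol_alt (A : List Int) (B : List Int) : List Int × List Int :=
  let d := B.foldl (fun s bit => s * 2 + (if bit = 1 then 1 else 0)) 0
  let st := A.foldl (fun (st : List Int × Int) bit =>
      (st.1 ++ [PySem.Int.floordiv (st.2 * 2 + (if bit = 1 then 1 else 0)) d],
       PySem.Int.mod (st.2 * 2 + (if bit = 1 then 1 else 0)) d)) ([], 0)
  let div := if st.1 = [] then [0] else stripZeros st.1
  let rb := (remBitsRev st.2.toNat).reverse
  let reste := if rb = [] then [0] else rb
  (div, reste)

-- ===== PRECONDITION & SPEC =====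
-- Pre_ excludes exactly the inputs where the Python A raises ZeroDivisionError (no bit of B equals 1, so binB = 0)
def Pre_div_eucl_pol (A : List Int) (B : List Int) : Prop := (1 : Int) ∈ B
instance (A : List Int) (B : List Int) : Decidable (Pre_div_eucl_pol A B) := by unfold Pre_div_eucl_pol; infer_instance
def pvWitness_div_eucl_pol : List Int × List Int := ([1, 0, 1, 1], [1, 1])

def Spec_div_eucl_pol (A : List Int) (B : List Int) (out : List Int × List Int) : Prop := out = div_eucl_pol_alt A B
instance (A : List Int) (B : List Int) (out : List Int × List Int) : Decidable (Spec_div_eucl_pol A B out) := by unfold Spec_div_eucl_pol; infer_instance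

-- ===== CLAIM (what is proved, stated in full; the proofs are below) =====
def Claim_equal_div_eucl_pol : Prop := ∀ (A : List Int) (B : List Int), Dom_div_eucl_pol A B → Pre_div_eucl_pol A B → Spec_div_eucl_pol A B (div_eucl_pol A B)

-- ===== LEMMAS AND PROOFS =====

-- the Horner value both sides' integers reduce to
def hv (L : List Int) : Int := L.foldl (fun s bit => s * 2 + (if bit = 1 then 1 else 0)) 0

theorem horner_shift (L : List Int) (s : Int) :
    L.foldl (fun s bit => s * 2 + (if bit = 1 then 1 else 0)) s
      = s * 2 ^ L.length + hv L := by
  induction L generalizing s with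
  | nil => simp [hv]
  | cons a t ih =>
    simp only [List.foldl_cons, List.length_cons, hv] at *
    rw [ih (s * 2 + _), ih (0 * 2 + _)]
    ring

theorem hv_cons (a : Int) (t : List Int) :
    hv (a :: t) = (if a = 1 then 1 else 0) * 2 ^ t.length + hv t := by
  have h := horner_shift t (0 * 2 + (if a = 1 then 1 else 0))
  simp only [hv, List.foldl_cons] at h ⊢
  rw [h]; ring_nf

-- A's reversed power-sum equals the Horner value
theorem powsum_eq_horner (L : List Int) :
    L.reverse.zipIdx.foldl (fun s p => if p.1 = 1 then s + (2 * p.1) ^ p.2 else s) 0 = hv L := by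
  induction L with
  | nil => simp [hv]
  | cons a t ih =>
    have hz : (t.reverse ++ [a]).zipIdx = t.reverse.zipIdx ++ [(a, t.reverse.length)] := by
      simp [List.zipIdx_append]
    rw [hv_cons]
    simp only [List.reverse_cons, hz, List.foldl_append, List.foldl_cons, List.foldl_nil,
      List.length_reverse, ih]
    by_cases h : a = 1 <;> simp [h] <;> ring

theorem hv_nonneg (L : List Int) : 0 ≤ hv L := by
  induction L with
  | nil => simp [hv]
  | cons a t ih =>
    rw [hv_cons]
    have h2 : (0 : Int) < 2 ^ t.length := by positivity
    split <;> nlinarith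

theorem hv_pos (B : List Int) (h : (1 : Int) ∈ B) : 0 < hv B := by
  induction B with
  | nil => simp at h
  | cons a t ih =>
    rw [hv_cons]
    have h2 : (0 : Int) < 2 ^ t.length := by positivity
    have h3 := hv_nonneg t
    rcases List.mem_cons.mp h with h1 | h1
    · rw [if_pos h1.symm]; nlinarith
    · have := ih h1
      split <;> nlinarith

-- long-division invariant
theorem ldiv (d : Int) (hd : 0 < d) (A : List Int) : ∀ (qs : List Int) (r0 : Int),
    0 ≤ r0 → r0 < d →
    ∃ q r, A.foldl (fun (st : List Int × Int) bit =>
        (st.1 ++ [PySem.Int.floordiv (st.2 * 2 + (if bit = 1 then 1 else 0)) d],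
         PySem.Int.mod (st.2 * 2 + (if bit = 1 then 1 else 0)) d)) (qs, r0) = (qs ++ q, r) ∧
      q.length = A.length ∧ (∀ b ∈ q, b = 0 ∨ b = 1) ∧ 0 ≤ r ∧ r < d ∧
      A.foldl (fun s bit => s * 2 + (if bit = 1 then 1 else 0)) r0 = d * hv q + r := by
  induction A with
  | nil => intro qs r0 h0 h1; exact ⟨[], r0, by simp, rfl, by simp, h0, h1, by simp [hv]⟩
  | cons a t ih =>
    intro qs r0 h0 h1
    have hc : (0 : Int) ≤ (if a = 1 then 1 else 0) ∧ (if a = 1 then (1:Int) else 0) ≤ 1 := by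
      split <;> omega
    set r1 := r0 * 2 + (if a = 1 then 1 else 0) with hr1
    have hb1 : 0 ≤ r1 := by omega
    have hb2 : r1 < 2 * d := by omega
    have hfd1 : PySem.Int.floordiv r1 d = (if d ≤ r1 then 1 else 0) := by
      rw [PySem.Int.floordiv_eq_ediv_of_pos hd]
      split
      · rw [show r1 = (r1 - d) + d * 1 by ring,
          Int.add_mul_ediv_left _ _ (ne_of_gt hd),
          Int.ediv_eq_zero_of_lt (by omega) (by omega)]
        norm_num
      · exact Int.ediv_eq_zero_of_lt (by omega) (by omega)
    have hmd1 : PySem.Int.mod r1 d = (if d ≤ r1 then r1 - d else r1) := by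
      rw [PySem.Int.mod_eq_emod_of_pos hd]
      split
      · rw [show r1 = (r1 - d) + d * 1 by ring, Int.add_mul_emod_self_left,
          Int.emod_eq_of_lt (by omega) (by omega)]
        ring
      · exact Int.emod_eq_of_lt (by omega) (by omega)
    by_cases hge : d ≤ r1
    · rw [if_pos hge] at hfd1 hmd1
      obtain ⟨q, r, heq, hlen, hbits, hr0, hrlt, hval⟩ :=
        ih (qs ++ [1]) (r1 - d) (by omega) (by omega)
      refine ⟨1 :: q, r, ?_, by simp [hlen], ?_, hr0, hrlt, ?_⟩
      · simp only [List.foldl_cons, ← hr1, hfd1, hmd1, List.append_assoc] at heq ⊢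
        simpa using heq
      · intro b hb; rcases List.mem_cons.mp hb with h | h
        · exact Or.inr h
        · exact hbits b h
      · have hq := hv_cons 1 q
        rw [if_pos rfl] at hq
        simp only [List.foldl_cons, ← hr1]
        rw [horner_shift t r1]
        rw [horner_shift t (r1 - d)] at hval
        rw [hq, hlen]
        nlinarith [hval]
    · rw [if_neg hge] at hfd1 hmd1
      obtain ⟨q, r, heq, hlen, hbits, hr0, hrlt, hval⟩ :=
        ih (qs ++ [0]) r1 (by omega) (by omega)
      refine ⟨0 :: q, r, ?_, by simp [hlen], ?_, hr0, hrlt, ?_⟩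
      · simp only [List.foldl_cons, ← hr1, hfd1, hmd1, List.append_assoc] at heq ⊢
        simpa using heq
      · intro b hb; rcases List.mem_cons.mp hb with h | h
        · exact Or.inl h
        · exact hbits b h
      · have hq := hv_cons 0 q
        rw [if_neg (by norm_num)] at hq
        simp only [List.foldl_cons, ← hr1]
        rw [hq]; simpa using hval

-- Nat-valued Horner, to reason about /2 and %2
def hvN (L : List Int) : Nat := L.foldl (fun s bit => s * 2 + (if bit = 1 then 1 else 0)) 0

theorem hvN_shift (L : List Int) (s : Nat) :
    L.foldl (fun s bit => s * 2 + (if bit = 1 then 1 else 0)) s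
      = s * 2 ^ L.length + hvN L := by
  induction L generalizing s with
  | nil => simp [hvN]
  | cons a t ih =>
    simp only [List.foldl_cons, List.length_cons, hvN] at *
    rw [ih (s * 2 + _), ih (0 * 2 + _)]
    ring

theorem hvN_cons (a : Int) (t : List Int) :
    hvN (a :: t) = (if a = 1 then 1 else 0) * 2 ^ t.length + hvN t := by
  have h := hvN_shift t (0 * 2 + (if a = 1 then 1 else 0))
  simp only [hvN, List.foldl_cons] at h ⊢
  rw [h]; ring_nf

theorem hv_eq_hvN (L : List Int) : hv L = (hvN L : Int) := by
  induction L with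
  | nil => simp [hv, hvN]
  | cons a t ih =>
    rw [hv_cons, hvN_cons, ih]
    push_cast
    split <;> push_cast <;> ring

theorem hvN_append_singleton (L : List Int) (b : Int) :
    hvN (L ++ [b]) = 2 * hvN L + (if b = 1 then 1 else 0) := by
  simp only [hvN, List.foldl_append, List.foldl_cons, List.foldl_nil]
  ring

theorem hvN_cons_one_pos (t : List Int) : 1 ≤ hvN (1 :: t) := by
  rw [hvN_cons, if_pos rfl]
  have h2 : 1 ≤ 2 ^ t.length := Nat.one_le_two_pow
  omega

theorem binDigits_lead_one (L : List Int) (hb : ∀ b ∈ L, b = 0 ∨ b = 1) :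
    binDigitsNat (hvN (1 :: L)) = 1 :: L := by
  induction L using List.reverseRecOn with
  | nil => simp [hvN, binDigitsNat]
  | append_singleton M b ih =>
    have hbM : ∀ x ∈ M, x = 0 ∨ x = 1 := fun x hx => hb x (by simp [hx])
    have hbb : b = 0 ∨ b = 1 := hb b (by simp)
    have hM : binDigitsNat (hvN (1 :: M)) = 1 :: M := ih hbM
    have hpos : 1 ≤ hvN (1 :: M) := hvN_cons_one_pos M
    have hsplit : hvN (1 :: (M ++ [b])) = 2 * hvN (1 :: M) + (if b = 1 then 1 else 0) := by
      rw [show (1 : Int) :: (M ++ [b]) = (1 :: M) ++ [b] from rfl, hvN_append_singleton]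
    set v := hvN (1 :: M) with hvdef
    set c : Nat := if b = 1 then 1 else 0 with hc
    have hcb : c < 2 := by rw [hc]; split <;> omega
    have hvpos : 2 * v + c ≠ 0 := by omega
    have hrec : binDigitsNat (2 * v + c) = binDigitsNat ((2 * v + c) / 2) ++ [(((2 * v + c) % 2 : Nat) : Int)] := by
      rcases Nat.exists_eq_succ_of_ne_zero hvpos with ⟨k, hk⟩
      rw [hk]; rw [binDigitsNat]
    have h1 : (2 * v + c) / 2 = v := by omega
    have h2 : (2 * v + c) % 2 = c := by omega
    rw [hsplit, hrec, h1, h2, hM]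
    rcases hbb with h | h <;> simp [hc, h]

theorem strip_eq_pyBin (L : List Int) (hb : ∀ b ∈ L, b = 0 ∨ b = 1) (hne : L ≠ []) :
    stripZeros L = pyBin (hv L) := by
  induction L with
  | nil => exact absurd rfl hne
  | cons a t ih =>
    have hba : a = 0 ∨ a = 1 := hb a (by simp)
    have hbt : ∀ b ∈ t, b = 0 ∨ b = 1 := fun b h => hb b (by simp [h])
    rcases hba with h | h
    · subst h
      have hvt : hv (0 :: t) = hv t := by rw [hv_cons]; norm_num
      cases t with
      | nil => simp [stripZeros, hv, pyBin]
      | cons x s =>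
        rw [hvt, show stripZeros (0 :: x :: s) = stripZeros (x :: s) from by simp [stripZeros]]
        exact ih hbt (by simp)
    · subst h
      have h1 : hv (1 :: t) = (hvN (1 :: t) : Int) := hv_eq_hvN _
      have hpos : 1 ≤ hvN (1 :: t) := hvN_cons_one_pos t
      have hstr : stripZeros (1 :: t) = 1 :: t := by cases t <;> simp [stripZeros]
      have hneg : ¬ ((hvN (1 :: t) : Int) ≤ 0) := by omega
      rw [hstr, h1, pyBin, if_neg hneg, Int.toNat_natCast]
      exact (binDigits_lead_one t hbt).symm

theorem remBits_rev (n : Nat) : (remBitsRev n).reverse = binDigitsNat n := by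
  induction n using Nat.strong_induction_on with
  | _ n ih =>
    cases n with
    | zero => simp [remBitsRev, binDigitsNat]
    | succ m =>
      rw [remBitsRev, binDigitsNat]
      simp only [List.reverse_cons]
      rw [ih ((m+1)/2) (by omega)]

theorem binDigitsNat_ne_nil (n : Nat) (h : 0 < n) : binDigitsNat n ≠ [] := by
  rcases Nat.exists_eq_succ_of_ne_zero (by omega : n ≠ 0) with ⟨k, hk⟩
  subst hk
  rw [binDigitsNat]
  simp

-- ===== VERDICT (by name: the statement is the Claim_ definition above) =====
theorem div_eucl_pol_spec : Claim_equal_div_eucl_pol := by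
  intro A B _ hpre
  unfold Spec_div_eucl_pol div_eucl_pol div_eucl_pol_alt
  simp only [powsum_eq_horner]
  have hB : List.foldl (fun s bit => s * 2 + (if bit = 1 then 1 else 0)) 0 B = hv B := rfl
  rw [hB]
  have hd : 0 < hv B := hv_pos B hpre
  obtain ⟨q, r, heq, hlen, hbits, hr0, hrlt, hval⟩ := ldiv (hv B) hd A [] 0 le_rfl hd
  have hvalA : hv A = hv B * hv q + r := hval
  have hcomm : hv B * hv q + r = r + hv B * hv q := by ring
  have hfd : PySem.Int.floordiv (hv A) (hv B) = hv q := by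
    rw [PySem.Int.floordiv_eq_ediv_of_pos hd, hvalA, hcomm,
      Int.add_mul_ediv_left _ _ (ne_of_gt hd), Int.ediv_eq_zero_of_lt hr0 hrlt]
    ring
  have hmd : PySem.Int.mod (hv A) (hv B) = r := by
    rw [PySem.Int.mod_eq_emod_of_pos hd, hvalA, hcomm, Int.add_mul_emod_self_left,
      Int.emod_eq_of_lt hr0 hrlt]
  rw [heq]
  simp only [List.nil_append]
  rw [hfd, hmd]
  congr 1
  · -- quotient side
    by_cases hq : q = []
    · subst hq; simp [pyBin, hv]
    · rw [if_neg hq]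
      exact (strip_eq_pyBin q hbits hq).symm
  · -- remainder side
    rw [remBits_rev]
    by_cases hr : r = 0
    · subst hr; simp [pyBin, binDigitsNat]
    · rw [if_neg (binDigitsNat_ne_nil r.toNat (by omega)), pyBin, if_neg (by omega)]
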